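-- pv_equiv track=rewrite | github.com/frankayra/Codeforces-296C | CGPT.py | solve
-- ===== SOURCE A (Python) =====
-- from collections import defaultdict
--
-- def gcd(a, b):
--     while b:
--         a, b = b, a % b
--     return a
--
-- def buildSparseTable(arr, n):
--     log = [0] * (n + 1)
--     for i in range(2, n + 1):
--         log[i] = log[i // 2] + 1
--
--     K = log[n] + 1
--     st = [[0] * K for _ in range(n)]
--
--     for i in range(n):
--         st[i][0] = arr[i]
--
--     j = 1
--     while (1 << j) <= n:
--         i = 0
--         while (i + (1 << j) - 1) < n:
--             st[i][j] = gcd(st[i][j - 1], st[i + (1 << (j - 1))][j - 1])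
--             i += 1
--         j += 1
--
--     return st, log
--
-- def queryGCD(L, R, st, log):
--     j = log[R - L + 1]
--     return gcd(st[L][j], st[R - (1 << j) + 1][j])
--
-- def solve(arr, queries):
--     n = len(arr)
--     st, log = buildSparseTable(arr, n)
--
--     result = []
--     for x in queries:
--         gcdCount = defaultdict(int)
--
--         i = 0
--         while i < n:
--             j = i
--             currentGCD = arr[i]
--             while j < n:
--                 currentGCD = queryGCD(i, j, st, log)
--                 gcdCount[currentGCD] += 1
--                 if currentGCD < x:
--                     break
--                 j += 1
--             i += 1
--
--         result.append(gcdCount[x])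
--
--     return result
-- ===== SOURCE B (Python) =====
-- def _gcd(a, b):
--     while b:
--         a, b = b, a % b
--     return a
--
--
-- def solve(arr, queries):
--     n = len(arr)
--     # Precompute once, for every start index i, the run-length-compressed list
--     # of prefix gcds gcd(arr[i..j]), j = i..n-1 (compressed back-to-front).
--     runs = []
--     for i in range(n):
--         gs = []
--         c = 0
--         for j in range(i, n):
--             c = arr[j] if j == i else _gcd(c, arr[j])
--             gs.append(c)
--         row = []
--         for g in reversed(gs):
--             if row and row[0][0] == g:
--                 row[0] = (g, row[0][1] + 1)
--             else:
--                 row.insert(0, (g, 1))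
--         runs.append(row)
--     result = []
--     for x in queries:
--         total = 0
--         for row in runs:
--             for g, cnt in row:
--                 if g < x:
--                     break
--                 if g == x:
--                     total += cnt
--         result.append(total)
--     return result
-- ===== Notes on version B (the rewrite author's own statement) =====
-- stated objective: faster
-- what changed: B drops the per-query sparse-table re-enumeration of all subarrays: it precomputes once, for each start index, the run-length-compressed list of incremental prefix gcds, then answers every query by scanning these compressed rows with the same early-exit rule.
import Mathlib
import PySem

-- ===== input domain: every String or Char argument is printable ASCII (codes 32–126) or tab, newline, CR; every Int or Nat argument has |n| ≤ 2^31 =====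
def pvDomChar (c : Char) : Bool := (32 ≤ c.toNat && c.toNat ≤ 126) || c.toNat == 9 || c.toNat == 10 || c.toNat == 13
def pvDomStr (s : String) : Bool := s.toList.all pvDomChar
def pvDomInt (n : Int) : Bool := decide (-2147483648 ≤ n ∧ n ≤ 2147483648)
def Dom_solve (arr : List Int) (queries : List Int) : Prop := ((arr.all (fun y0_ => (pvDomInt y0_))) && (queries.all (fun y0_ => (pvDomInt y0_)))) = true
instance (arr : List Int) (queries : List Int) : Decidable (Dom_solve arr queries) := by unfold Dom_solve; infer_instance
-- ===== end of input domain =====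

-- B replaces A's per-query sparse-table enumeration of all subarray gcds by one
-- precomputation of run-length-compressed prefix-gcd rows, scanned per query (faster in q).

-- termination helper for the Euclid loops (cited by pyGcd/gcdAlt decreasing_by)
theorem pymod_natAbs_lt (a b : Int) (hb : b ≠ 0) :
    (PySem.Int.mod a b).natAbs < b.natAbs := by
  rcases lt_or_gt_of_ne hb with h | h
  · have := PySem.Int.mod_neg_bounds a h
    omega
  · have h1 := PySem.Int.mod_nonneg a h
    have h2 := PySem.Int.mod_lt a h
    omega

-- ===== PORT A =====

-- A's gcd: while b: a, b = b, a % b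
def pyGcd (a b : Int) : Int :=
  if h : b = 0 then a else pyGcd b (PySem.Int.mod a b)
termination_by b.natAbs
decreasing_by exact pymod_natAbs_lt a b h

-- log = [0]*(n+1); for i in range(2, n+1): log[i] = log[i//2] + 1
def buildLogLoop (n : Nat) (lg : List Nat) (i : Nat) : List Nat :=
  if i ≤ n then buildLogLoop n (lg.set i (lg.getD (i / 2) 0 + 1)) (i + 1) else lg
termination_by n + 1 - i

-- for i in range(n): st[i][0] = arr[i]
def stFill0 (arr : List Int) (n : Nat) (st : List (List Int)) (i : Nat) : List (List Int) :=
  if i < n then stFill0 arr n (st.set i ((st.getD i []).set 0 (arr.getD i 0))) (i + 1) else st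
termination_by n - i

-- inner while over i at level j
def stInner (n j : Nat) (st : List (List Int)) (i : Nat) : List (List Int) :=
  if i + (1 <<< j) - 1 < n then
    stInner n j (st.set i ((st.getD i []).set j
      (pyGcd ((st.getD i []).getD (j - 1) 0)
             ((st.getD (i + (1 <<< (j - 1))) []).getD (j - 1) 0)))) (i + 1)
  else st
termination_by n - i
decreasing_by
  have h1 : 1 ≤ 1 <<< j := by
    rw [Nat.shiftLeft_eq, Nat.one_mul]; exact Nat.one_le_two_pow
  omega

-- outer while over j
def stOuter (n : Nat) (st : List (List Int)) (j : Nat) : List (List Int) :=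
  if 1 <<< j ≤ n then stOuter n (stInner n j st 0) (j + 1) else st
termination_by n + 1 - (1 <<< j)
decreasing_by
  have h2 : (1 <<< j) < (1 <<< (j + 1)) := by
    simp only [Nat.shiftLeft_eq, Nat.one_mul, Nat.pow_succ]
    have : 1 ≤ 2 ^ j := Nat.one_le_two_pow
    omega
  omega

def buildSparseTable (arr : List Int) (n : Nat) : List (List Int) × List Nat :=
  let lg := buildLogLoop n (List.replicate (n + 1) 0) 2
  let K := lg.getD n 0 + 1
  let st := stFill0 arr n (List.replicate n (List.replicate K 0)) 0
  (stOuter n st 1, lg)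

def queryGCD (L R : Nat) (st : List (List Int)) (lg : List Nat) : Int :=
  let j := lg.getD (R - L + 1) 0
  -- Python's R - (1 << j) + 1 is nonnegative whenever queried; in Nat we compute it
  -- as R + 1 - (1 <<< j), the same value, to avoid Nat-subtraction truncation
  pyGcd ((st.getD L []).getD j 0) ((st.getD (R + 1 - (1 <<< j)) []).getD j 0)

-- inner while over j (per query x, per start i); gcdCount[cur] += 1, break if cur < x
-- (Python's dead initial assignment currentGCD = arr[i] is overwritten before any use)
def solveInner (n : Nat) (st : List (List Int)) (lg : List Nat) (x : Int) (i j : Nat)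
    (d : PySem.Dict Int Int) : PySem.Dict Int Int :=
  if j < n then
    let cur := queryGCD i j st lg
    let d' := d.modify cur 0 (· + 1)
    if cur < x then d' else solveInner n st lg x i (j + 1) d'
  else d
termination_by n - j

def solveOuter (n : Nat) (st : List (List Int)) (lg : List Nat) (x : Int) (i : Nat)
    (d : PySem.Dict Int Int) : PySem.Dict Int Int :=
  if i < n then solveOuter n st lg x (i + 1) (solveInner n st lg x i i d) else d
termination_by n - i

def solve (arr : List Int) (queries : List Int) : List Int :=
  let n := arr.length
  let p := buildSparseTable arr n
  queries.foldl (fun result x =>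
    result ++ [(solveOuter n p.1 p.2 x 0 PySem.Dict.empty).getD x 0]) []

-- ===== PORT B =====

-- Source B's _gcd (same Euclid loop as A's helper)
def gcdAlt (a b : Int) : Int :=
  if h : b = 0 then a else gcdAlt b (PySem.Int.mod a b)
termination_by b.natAbs
decreasing_by exact pymod_natAbs_lt a b h

-- gs loop: c = arr[j] if j == i else _gcd(c, arr[j]); gs.append(c)
def gcdRow (arr : List Int) (i n : Nat) (c : Int) (j : Nat) : List Int :=
  if j < n then
    let c' := if j = i then arr.getD j 0 else gcdAlt c (arr.getD j 0)
    c' :: gcdRow arr i n c' (j + 1)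
  else []
termination_by n - j

-- one step of the backward compression loop (prepend or bump the front run)
def stepRun (g : Int) (row : List (Int × Int)) : List (Int × Int) :=
  match row with
  | (g0, c0) :: rest => if g0 = g then (g, c0 + 1) :: rest else (g, 1) :: (g0, c0) :: rest
  | [] => [(g, 1)]

-- for g in reversed(gs): prepend/bump  — a right fold of stepRun
def compress (gs : List Int) : List (Int × Int) := gs.foldr stepRun []

def buildRuns (arr : List Int) (n i : Nat) : List (List (Int × Int)) :=
  if i < n then compress (gcdRow arr i n 0 i) :: buildRuns arr n (i + 1) else []
termination_by n - i

-- per-row scan with break: for g, cnt in row: if g < x: break; if g == x: total += cnt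
def scanRow (x : Int) : List (Int × Int) → Int
  | [] => 0
  | (g, cnt) :: rest => if g < x then 0 else (if g = x then cnt else 0) + scanRow x rest

def solve_alt (arr : List Int) (queries : List Int) : List Int :=
  let n := arr.length
  let runs := buildRuns arr n 0
  queries.foldl (fun result x =>
    result ++ [runs.foldl (fun t row => t + scanRow x row) 0]) []

-- ===== PRECONDITION & SPEC =====
def Spec_solve (arr : List Int) (queries : List Int) (out : List Int) : Prop := out = solve_alt arr queries
instance (arr : List Int) (queries : List Int) (out : List Int) : Decidable (Spec_solve arr queries out) := by unfold Spec_solve; infer_instance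

-- ===== CLAIM (what is proved, stated in full; the proofs are below) =====
def Claim_equal_solve : Prop := ∀ (arr : List Int) (queries : List Int), Dom_solve arr queries → Spec_solve arr queries (solve arr queries)

-- ===== LEMMAS AND PROOFS =====

-- gcd(arr[i..i+k]), the left fold of pyGcd over a segment
def F (arr : List Int) (i : Nat) : Nat → Int
  | 0 => arr.getD i 0
  | k + 1 => pyGcd (F arr i k) (arr.getD (i + k + 1) 0)

theorem pyGcd_char (a b : Int) : pyGcd a b = if b = 0 then a else b.sign * Int.gcd a b := by
  induction a, b using pyGcd.induct with
  | case1 a => rw [pyGcd]; simp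
  | case2 a b hb ih =>
      rw [pyGcd]; rw [dif_neg hb, if_neg hb]
      rw [ih]
      have hmod : PySem.Int.floordiv a b * b + PySem.Int.mod a b = a :=
        PySem.Int.floordiv_mul_add_mod a b
      have hg : Int.gcd b (PySem.Int.mod a b) = Int.gcd a b := by
        have : PySem.Int.mod a b = a + b * (-(PySem.Int.floordiv a b)) := by linarith
        rw [this, Int.gcd_add_mul_left_right, Int.gcd_comm]
      by_cases hm : PySem.Int.mod a b = 0
      · rw [hm]; simp only [reduceIte]
        have hdvd : b ∣ a := (PySem.Int.mod_eq_zero_iff_dvd a b).mp (by exact_mod_cast hm)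
        rw [Int.gcd_eq_natAbs_right_iff_dvd.mpr hdvd]
        exact (Int.sign_mul_natAbs b).symm
      · rw [if_neg hm, hg]
        congr 1
        rcases lt_or_gt_of_ne hb with h | h
        · have := PySem.Int.mod_neg_bounds a h
          have : PySem.Int.mod a b < 0 := by omega
          rw [Int.sign_eq_neg_one_of_neg this, Int.sign_eq_neg_one_of_neg h]
        · have h1 := PySem.Int.mod_nonneg a h
          have : 0 < PySem.Int.mod a b := by omega
          rw [Int.sign_eq_one_of_pos this, Int.sign_eq_one_of_pos h]

theorem pyGcd_zero (a : Int) : pyGcd a 0 = a := by rw [pyGcd]; simp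

theorem natAbs_pyGcd (a b : Int) :
    (pyGcd a b).natAbs = Int.gcd a b := by
  rw [pyGcd_char]
  by_cases hb : b = 0
  · simp [hb, Int.gcd]
  · rw [if_neg hb, Int.natAbs_mul, Int.natAbs_sign, if_neg hb]
    simp

theorem pyGcd_eq_zero_iff (a b : Int) : pyGcd a b = 0 ↔ a = 0 ∧ b = 0 := by
  rw [pyGcd_char]
  by_cases hb : b = 0
  · simp [hb]
  · rw [if_neg hb]
    constructor
    · intro h
      exfalso
      rcases Int.mul_eq_zero.mp h with h | h
      · exact hb (Int.sign_eq_zero_iff_zero.mp h)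
      · have : Int.gcd a b ≠ 0 := by
          simp [Int.gcd_eq_zero_iff, hb]
        exact this (by exact_mod_cast h)
    · intro ⟨_, h⟩; exact absurd h hb

theorem sign_pyGcd (a b : Int) (hb : b ≠ 0) : (pyGcd a b).sign = b.sign := by
  rw [pyGcd_char, if_neg hb]
  have hg : (0:Int) < Int.gcd a b := by
    have : Int.gcd a b ≠ 0 := by simp [Int.gcd_eq_zero_iff, hb]
    positivity
  rcases lt_or_gt_of_ne hb with h | h
  · rw [Int.sign_eq_neg_one_of_neg h]
    rw [Int.sign_eq_neg_one_of_neg (by nlinarith)]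
  · rw [Int.sign_eq_one_of_pos h, Int.sign_eq_one_of_pos (by nlinarith)]

theorem pyGcd_idem (a : Int) : pyGcd a a = a := by
  rw [pyGcd_char]
  by_cases h : a = 0
  · simp [h]
  · rw [if_neg h, Int.gcd_self]
    exact Int.sign_mul_natAbs a

theorem pyGcd_assoc (a b c : Int) : pyGcd (pyGcd a b) c = pyGcd a (pyGcd b c) := by
  by_cases hc : c = 0
  · subst hc
    rw [pyGcd_zero, pyGcd_zero]
  · have hbc : pyGcd b c ≠ 0 := by
      rw [Ne, pyGcd_eq_zero_iff]; tauto
    rw [pyGcd_char (pyGcd a b) c, if_neg hc]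
    rw [pyGcd_char a (pyGcd b c), if_neg hbc]
    rw [sign_pyGcd b c hc]
    congr 1
    show (Int.gcd (pyGcd a b) c : Int) = Int.gcd a (pyGcd b c)
    have h1 : Int.gcd (pyGcd a b) c = Nat.gcd (Int.gcd a b) c.natAbs := by
      rw [Int.gcd, natAbs_pyGcd]
    have h2 : Int.gcd a (pyGcd b c) = Nat.gcd a.natAbs (Int.gcd b c) := by
      rw [Int.gcd, natAbs_pyGcd]
    rw [h1, h2, Int.gcd, Int.gcd, Nat.gcd_assoc]

theorem pyGcd_absorb (a b : Int) : pyGcd a (pyGcd a b) = pyGcd a b := by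
  by_cases hb : b = 0
  · subst hb; rw [pyGcd_zero, pyGcd_idem]
  · have hab : pyGcd a b ≠ 0 := by rw [Ne, pyGcd_eq_zero_iff]; tauto
    rw [pyGcd_char a (pyGcd a b), if_neg hab, sign_pyGcd a b hb]
    have habs : Int.gcd a (pyGcd a b) = Int.gcd a b := by
      rw [Int.gcd, natAbs_pyGcd]
      rw [Int.gcd, ← Nat.gcd_assoc, Nat.gcd_self]
    rw [habs, pyGcd_char a b, if_neg hb]

theorem pyGcd_rabsorb (a b : Int) : pyGcd (pyGcd a b) b = pyGcd a b := by
  rw [pyGcd_assoc, pyGcd_idem]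

theorem F_split (arr : List Int) (i k1 k2 : Nat) :
    F arr i (k1 + 1 + k2) = pyGcd (F arr i k1) (F arr (i + k1 + 1) k2) := by
  induction k2 with
  | zero => rfl
  | succ k2 ih =>
    have e1 : k1 + 1 + (k2 + 1) = (k1 + 1 + k2) + 1 := by omega
    rw [e1]
    show pyGcd (F arr i (k1 + 1 + k2)) (arr.getD (i + (k1 + 1 + k2) + 1) 0) = _
    rw [ih, pyGcd_assoc]
    have e2 : i + (k1 + 1 + k2) + 1 = (i + k1 + 1) + k2 + 1 := by omega
    rw [e2]
    rfl

theorem F_overlap' (arr : List Int) (L a b c : Nat) :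
    pyGcd (F arr L (a + b)) (F arr (L + a) (b + c)) = F arr L (a + b + c) := by
  rcases a with _ | a'
  · rcases c with _ | c'
    · simp only [Nat.zero_add, Nat.add_zero]
      exact pyGcd_idem _
    · simp only [Nat.zero_add, Nat.add_zero]
      have e : b + (c' + 1) = b + 1 + c' := by omega
      rw [e, F_split, pyGcd_absorb]
  · rcases c with _ | c'
    · simp only [Nat.add_zero]
      have e : a' + 1 + b = a' + 1 + b := rfl
      rw [F_split arr L a' b]
      exact pyGcd_rabsorb _ _
    · have e1 : a' + 1 + b + (c' + 1) = (a' + 1 + b) + 1 + c' := by omega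
      have e2 : b + (c' + 1) = b + 1 + c' := by omega
      rw [e1, e2, F_split arr L (a' + 1 + b) c', F_split arr L a' b,
          F_split arr (L + (a' + 1)) b c']
      have e3 : L + (a' + 1) + b + 1 = L + (a' + 1 + b) + 1 := by omega
      have e5 : L + (a' + 1) = L + a' + 1 := by omega
      rw [e3, e5, pyGcd_assoc (F arr L a'), pyGcd_absorb, ← pyGcd_assoc]

theorem F_overlap (arr : List Int) (L p s t : Nat)
    (hp : 1 ≤ p) (hsp : s ≤ p) (hpt : p ≤ t + 1) (hst : s ≤ t) :
    pyGcd (F arr L (p - 1)) (F arr (L + s) (t - s)) = F arr L t := by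
  rcases Nat.lt_or_ge s p with hlt | hge
  · obtain ⟨a, b, c, e1, e2, e3, e4⟩ :
        ∃ a b c, s = a ∧ p - 1 = a + b ∧ t - s = b + c ∧ t = a + b + c :=
      ⟨s, p - 1 - s, t + 1 - p, rfl, by omega, by omega, by omega⟩
    rw [e2, e3, show L + s = L + a from by rw [e1]]
    conv_rhs => rw [e4]
    exact F_overlap' arr L a b c
  · have hsp' : s = p := le_antisymm hsp hge
    subst hsp'
    obtain ⟨a', ea⟩ : ∃ a', s = a' + 1 := ⟨s - 1, by omega⟩
    subst ea
    conv_rhs => rw [show t = a' + 1 + (t - (a' + 1)) from by omega]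
    rw [F_split]
    have e5 : L + (a' + 1) = L + a' + 1 := by omega
    simp only [Nat.add_succ_sub_one, Nat.add_zero, e5]

theorem getD_set_self {α : Type} (l : List α) (i m : Nat) (v d : α) (h : i < l.length)
    (he : i = m) : (l.set i v).getD m d = v := by
  subst he; simp [List.getD, h]

theorem getD_set_ne {α : Type} (l : List α) (i m : Nat) (v d : α) (he : i ≠ m) :
    (l.set i v).getD m d = l.getD m d := by
  simp [List.getD, he]


theorem buildLogLoop_spec (n : Nat) (lg : List Nat) (i : Nat) (h2 : 2 ≤ i)
    (hlen : lg.length = n + 1) (hpre : ∀ m, m < i → lg.getD m 0 = Nat.log2 m) :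
    (buildLogLoop n lg i).length = n + 1 ∧
      ∀ m, m ≤ n → (buildLogLoop n lg i).getD m 0 = Nat.log2 m := by
  induction lg, i using buildLogLoop.induct n with
  | case1 lg i hle ih =>
    rw [buildLogLoop, if_pos hle]
    apply ih (by omega)
    · rw [List.length_set, hlen]
    · intro m hm
      rcases Nat.lt_or_ge m i with hmi | hmi
      · rw [getD_set_ne _ _ _ _ _ (by omega)]
        rw [hpre m hmi]
      · have hmi' : i = m := by omega
        subst hmi'
        rw [getD_set_self _ _ _ _ _ (by omega) rfl]
        rw [hpre (i / 2) (by omega)]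
        rw [show Nat.log2 i = Nat.log2 (i / 2) + 1 from by rw [Nat.log2_def]; rw [if_pos (by omega : 2 ≤ i)]]
  | case2 lg i hle =>
    rw [buildLogLoop, if_neg hle]
    exact ⟨hlen, fun m hm => hpre m (by omega)⟩




def STInv (arr : List Int) (n K : Nat) (st : List (List Int)) (j : Nat) : Prop :=
  st.length = n ∧ (∀ i, i < n → (st.getD i []).length = K) ∧
    ∀ i k, i < n → k < K → k < j → i + 2 ^ k ≤ n →
      (st.getD i []).getD k 0 = F arr i (2 ^ k - 1)

theorem one_shiftLeft_eq (j : Nat) : 1 <<< j = 2 ^ j := by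
  rw [Nat.shiftLeft_eq, Nat.one_mul]

theorem stFill0_spec (arr : List Int) (n K : Nat) (hK : 1 ≤ K) :
    STInv arr n K (stFill0 arr n (List.replicate n (List.replicate K 0)) 0) 1 := by
  suffices h : ∀ i0 st, st.length = n → (∀ i, i < n → (st.getD i []).length = K) →
      (∀ i, i < n → i < i0 → (st.getD i []).getD 0 0 = F arr i 0) →
      STInv arr n K (stFill0 arr n st i0) 1 by
    apply h 0 (List.replicate n (List.replicate K 0)) (by simp) ?_ (by omega)
    intro i hi
    rw [List.getD_eq_getElem _ _ (by simpa using hi)]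
    simp
  intro i0 st
  induction st, i0 using stFill0.induct arr n with
  | case1 st i0 hlt ih =>
    intro hlen hrows hvals
    rw [stFill0, if_pos hlt]
    apply ih
    · rw [List.length_set, hlen]
    · intro i hi
      by_cases he : i0 = i
      · subst he
        rw [getD_set_self _ _ _ _ _ (by omega) rfl, List.length_set]
        exact hrows i0 hi
      · rw [getD_set_ne _ _ _ _ _ he]
        exact hrows i hi
    · intro i hi hii
      by_cases he : i0 = i
      · subst he
        rw [getD_set_self _ _ _ _ _ (by omega) rfl]
        rw [getD_set_self _ _ _ _ _ (by rw [hrows i0 hi]; omega) rfl]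
        rfl
      · rw [getD_set_ne _ _ _ _ _ he]
        exact hvals i hi (by omega)
  | case2 st i0 hlt =>
    intro hlen hrows hvals
    rw [stFill0, if_neg hlt]
    refine ⟨hlen, hrows, ?_⟩
    intro i k hi hk hk1 hik
    have : k = 0 := by omega
    subst this
    exact hvals i hi (by omega)

theorem stInner_spec (arr : List Int) (n K j : Nat) (hj : 1 ≤ j) (hjK : j < K) :
    ∀ i0 st, STInv arr n K st j →
      (∀ i, i < n → i < i0 → i + 2 ^ j ≤ n → (st.getD i []).getD j 0 = F arr i (2 ^ j - 1)) →
      STInv arr n K (stInner n j st i0) (j + 1) := by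
  intro i0 st
  induction st, i0 using stInner.induct n j with
  | case1 st i0 hlt ih =>
    intro ⟨hlen, hrows, hvals⟩ hcolj
    rw [stInner, if_pos hlt]
    rw [one_shiftLeft_eq] at hlt
    have hpow1 : 1 ≤ 2 ^ j := Nat.one_le_two_pow
    have hpow2 : 2 ^ (j - 1) + 2 ^ (j - 1) = 2 ^ j := by
      conv_rhs => rw [← Nat.sub_add_cancel hj]
      rw [Nat.two_pow_succ]
    have hi0n : i0 < n := by omega
    have hi0jn : i0 + 2 ^ j ≤ n := by omega
    -- value written at column j
    have hv1 : (st.getD i0 []).getD (j - 1) 0 = F arr i0 (2 ^ (j - 1) - 1) := by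
      apply hvals i0 (j - 1) hi0n (by omega) (by omega) (by omega)
    have hv2 : (st.getD (i0 + (1 <<< (j - 1))) []).getD (j - 1) 0
        = F arr (i0 + 2 ^ (j - 1)) (2 ^ (j - 1) - 1) := by
      rw [one_shiftLeft_eq]
      apply hvals _ (j - 1) (by omega) (by omega) (by omega) (by omega)
    have hvF : pyGcd ((st.getD i0 []).getD (j - 1) 0)
        ((st.getD (i0 + (1 <<< (j - 1))) []).getD (j - 1) 0) = F arr i0 (2 ^ j - 1) := by
      rw [hv1, hv2]
      have e1 : 2 ^ j - 1 = (2 ^ (j - 1) - 1) + 1 + (2 ^ (j - 1) - 1) := by omega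
      have e2 : i0 + (2 ^ (j - 1) - 1) + 1 = i0 + 2 ^ (j - 1) := by omega
      rw [e1, F_split, e2]
    apply ih
    · refine ⟨by rw [List.length_set, hlen], ?_, ?_⟩
      · intro i hi
        by_cases he : i0 = i
        · subst he
          rw [getD_set_self _ _ _ _ _ (by omega) rfl, List.length_set]
          exact hrows i0 hi
        · rw [getD_set_ne _ _ _ _ _ he]
          exact hrows i hi
      · intro i k hi hk hkj hikn
        by_cases he : i0 = i
        · subst he
          rw [getD_set_self _ _ _ _ _ (by omega) rfl]
          rw [getD_set_ne _ _ _ _ _ (by omega)]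
          exact hvals i0 k hi hk hkj hikn
        · rw [getD_set_ne _ _ _ _ _ he]
          exact hvals i k hi hk hkj hikn
    · intro i hi hii hijn
      by_cases he : i0 = i
      · subst he
        rw [getD_set_self _ _ _ _ _ (by omega) rfl]
        rw [getD_set_self _ _ _ _ _ (by rw [hrows i0 hi]; omega) rfl]
        exact hvF
      · rw [getD_set_ne _ _ _ _ _ he]
        exact hcolj i hi (by omega) hijn
  | case2 st i0 hlt =>
    intro ⟨hlen, hrows, hvals⟩ hcolj
    rw [stInner, if_neg hlt]
    rw [one_shiftLeft_eq] at hlt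
    have hpow1 : 1 ≤ 2 ^ j := Nat.one_le_two_pow
    refine ⟨hlen, hrows, ?_⟩
    intro i k hi hk hkj hikn
    by_cases hkj' : k < j
    · exact hvals i k hi hk hkj' hikn
    · have : k = j := by omega
      subst this
      exact hcolj i hi (by omega) hikn

theorem stOuter_spec (arr : List Int) (n K : Nat) (hK : ∀ k, 2 ^ k ≤ n → k < K) :
    ∀ j st, 1 ≤ j → STInv arr n K st j →
      ∀ i k, i < n → i + 2 ^ k ≤ n →
        ((stOuter n st j).getD i []).getD k 0 = F arr i (2 ^ k - 1) := by
  intro j st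
  induction st, j using stOuter.induct n with
  | case1 st j hle ih =>
    intro hj hst i k hi hik
    rw [stOuter, if_pos hle]
    rw [one_shiftLeft_eq] at hle
    apply ih (by omega) ?_ i k hi hik
    apply stInner_spec arr n K j hj (hK j hle) 0 st hst
    intro i' _ hlt0 _
    omega
  | case2 st j hle =>
    intro hj hst i k hi hik
    rw [stOuter, if_neg hle]
    rw [one_shiftLeft_eq] at hle
    have hkn : 2 ^ k ≤ n := by omega
    have hkj : k < j := by
      by_contra hc
      have : 2 ^ j ≤ 2 ^ k := Nat.pow_le_pow_right (by omega) (by omega)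
      omega
    exact hst.2.2 i k hi (hK k hkn) hkj hik


theorem gcdAlt_eq (a b : Int) : gcdAlt a b = pyGcd a b := by
  induction a, b using gcdAlt.induct with
  | case1 a => rw [gcdAlt, pyGcd]; simp
  | case2 a b hb ih => rw [gcdAlt, pyGcd, dif_neg hb, dif_neg hb, ih]

theorem log_spec (n m : Nat) (hm : m ≤ n) :
    (buildLogLoop n (List.replicate (n + 1) 0) 2).getD m 0 = Nat.log2 m := by
  refine (buildLogLoop_spec n (List.replicate (n + 1) 0) 2 (by omega) (by simp) ?_).2 m hm
  intro m' hm2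
  have h0 : (List.replicate (n + 1) (0 : Nat)).getD m' 0 = 0 := by
    rcases Nat.lt_or_ge m' (n + 1) with h | h
    · rw [List.getD_eq_getElem _ _ (by simpa using h)]
      simp
    · rw [List.getD_eq_default _ _ (by simpa using h)]
  rw [h0]
  interval_cases m' <;> decide

theorem st_spec (arr : List Int) (n : Nat) (i k : Nat)
    (hi : i < n) (hik : i + 2 ^ k ≤ n) :
    (((buildSparseTable arr n).1.getD i []).getD k 0) = F arr i (2 ^ k - 1) := by
  show ((stOuter n (stFill0 arr n
      (List.replicate n (List.replicate ((buildLogLoop n (List.replicate (n + 1) 0) 2).getD n 0 + 1) 0)) 0)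
      1).getD i []).getD k 0 = F arr i (2 ^ k - 1)
  set K := (buildLogLoop n (List.replicate (n + 1) 0) 2).getD n 0 + 1 with hKdef
  have hKval : K = Nat.log2 n + 1 := by rw [hKdef, log_spec n n (le_refl n)]
  have hK : ∀ k', 2 ^ k' ≤ n → k' < K := by
    intro k' hk'
    have hn0 : n ≠ 0 := by
      have : 1 ≤ 2 ^ k' := Nat.one_le_two_pow
      omega
    have : k' ≤ Nat.log2 n := (Nat.le_log2 hn0).mpr hk'
    omega
  exact stOuter_spec arr n K hK 1 _ (by omega) (stFill0_spec arr n K (by omega)) i k hi hik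

theorem query_spec (arr : List Int) (n : Nat) (L R : Nat)
    (hLR : L ≤ R) (hR : R < n) :
    queryGCD L R (buildSparseTable arr n).1 (buildSparseTable arr n).2 = F arr L (R - L) := by
  have hlg : (buildSparseTable arr n).2 = buildLogLoop n (List.replicate (n + 1) 0) 2 := rfl
  rw [queryGCD, hlg]
  have hlen : R - L + 1 ≤ n := by omega
  rw [log_spec n (R - L + 1) hlen]
  set j := Nat.log2 (R - L + 1) with hjdef
  have h1 : 2 ^ j ≤ R - L + 1 := Nat.log2_self_le (by omega)
  have h2 : R - L + 1 < 2 ^ (j + 1) := Nat.lt_log2_self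
  have hpow : 2 ^ (j + 1) = 2 ^ j + 2 ^ j := Nat.two_pow_succ j
  have hp1 : 1 ≤ 2 ^ j := Nat.one_le_two_pow
  rw [one_shiftLeft_eq]
  have e1 : ((buildSparseTable arr n).1.getD L []).getD j 0 = F arr L (2 ^ j - 1) :=
    st_spec arr n L j (by omega) (by omega)
  have e2 : ((buildSparseTable arr n).1.getD (R + 1 - 2 ^ j) []).getD j 0
      = F arr (R + 1 - 2 ^ j) (2 ^ j - 1) :=
    st_spec arr n (R + 1 - 2 ^ j) j (by omega) (by omega)
  rw [e1, e2]
  have eM : R + 1 - 2 ^ j = L + (R + 1 - 2 ^ j - L) := by omega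
  rw [eM]
  have h := F_overlap arr L (2 ^ j) (R + 1 - 2 ^ j - L) (R - L) hp1 (by omega) (by omega) (by omega)
  rw [show R - L - (R + 1 - 2 ^ j - L) = 2 ^ j - 1 from by omega] at h
  exact h

-- ---- A's counting loops, characterized ----

def seqCnt (arr : List Int) (n : Nat) (x : Int) (i j : Nat) : Int :=
  if j < n then
    (if F arr i (j - i) = x then 1 else 0) +
      (if F arr i (j - i) < x then 0 else seqCnt arr n x i (j + 1))
  else 0
termination_by n - j

def totCnt (arr : List Int) (n : Nat) (x : Int) (i : Nat) : Int :=
  if i < n then seqCnt arr n x i i + totCnt arr n x (i + 1) else 0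
termination_by n - i

theorem solveInner_spec (arr : List Int) (x : Int) (i : Nat) :
    ∀ j d, i ≤ j →
    (solveInner arr.length (buildSparseTable arr arr.length).1
        (buildSparseTable arr arr.length).2 x i j d).getD x 0 =
      d.getD x 0 + seqCnt arr arr.length x i j := by
  suffices H : ∀ fuel j d, arr.length - j ≤ fuel → i ≤ j →
      (solveInner arr.length (buildSparseTable arr arr.length).1
          (buildSparseTable arr arr.length).2 x i j d).getD x 0 =
        d.getD x 0 + seqCnt arr arr.length x i j by
    exact fun j d h => H (arr.length - j) j d (le_refl _) h
  intro fuel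
  induction fuel with
  | zero =>
    intro j d hf hij
    have hlt : ¬ j < arr.length := by omega
    rw [solveInner, if_neg hlt, seqCnt, if_neg hlt]
    omega
  | succ f ihf =>
    intro j d hf hij
    by_cases hlt : j < arr.length
    · have hq : queryGCD i j (buildSparseTable arr arr.length).1
          (buildSparseTable arr arr.length).2 = F arr i (j - i) :=
        query_spec arr arr.length i j hij hlt
      rw [solveInner, if_pos hlt]
      simp only [hq]
      conv_rhs => rw [seqCnt, if_pos hlt]
      by_cases hcur : F arr i (j - i) < x
      · rw [if_pos hcur, PySem.Dict.getD_modify]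
        rw [if_neg (by omega : ¬ x = F arr i (j - i)),
            if_neg (by omega : ¬ F arr i (j - i) = x), if_pos hcur]
        simp
      · rw [if_neg hcur]
        rw [ihf (j + 1) _ (by omega) (by omega)]
        rw [PySem.Dict.getD_modify, if_neg hcur]
        by_cases hx : x = F arr i (j - i)
        · subst hx
          rw [if_pos rfl, if_pos rfl]
          omega
        · rw [if_neg hx, if_neg (fun h => hx h.symm)]
          omega
    · rw [solveInner, if_neg hlt, seqCnt, if_neg hlt]
      omega

theorem solveOuter_spec (arr : List Int) (x : Int) :
    ∀ i d,
    (solveOuter arr.length (buildSparseTable arr arr.length).1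
        (buildSparseTable arr arr.length).2 x i d).getD x 0 =
      d.getD x 0 + totCnt arr arr.length x i := by
  intro i d
  induction i, d using solveOuter.induct arr.length (buildSparseTable arr arr.length).1
      (buildSparseTable arr arr.length).2 x with
  | case1 i d hlt ih =>
    rw [solveOuter, if_pos hlt, ih, solveInner_spec arr x i i d (le_refl i)]
    conv_rhs => rw [totCnt, if_pos hlt]
    omega
  | case2 i d hlt =>
    rw [solveOuter, if_neg hlt, totCnt, if_neg hlt]
    omega

-- ---- B's counting, characterized ----

def gseq (arr : List Int) (n i j : Nat) : List Int :=
  if j < n then F arr i (j - i) :: gseq arr n i (j + 1) else []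
termination_by n - j

theorem gcdRow_eq (arr : List Int) (n i : Nat) :
    ∀ j c, i ≤ j → (i < j → c = F arr i (j - i - 1)) →
      gcdRow arr i n c j = gseq arr n i j := by
  suffices H : ∀ fuel j c, n - j ≤ fuel → i ≤ j → (i < j → c = F arr i (j - i - 1)) →
      gcdRow arr i n c j = gseq arr n i j by
    exact fun j c h1 h2 => H (n - j) j c (le_refl _) h1 h2
  intro fuel
  induction fuel with
  | zero =>
    intro j c hf hij hc
    have hlt : ¬ j < n := by omega
    rw [gcdRow, if_neg hlt, gseq, if_neg hlt]
  | succ f ihf =>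
    intro j c hf hij hc
    by_cases hlt : j < n
    · rw [gcdRow, if_pos hlt, gseq, if_pos hlt]
      have hval : (if j = i then arr.getD j 0 else gcdAlt c (arr.getD j 0)) = F arr i (j - i) := by
        by_cases he : j = i
        · subst he
          rw [if_pos rfl]
          have e0 : j - j = 0 := by omega
          rw [e0]
          rfl
        · rw [if_neg he, gcdAlt_eq, hc (by omega)]
          have e : j - i = (j - i - 1) + 1 := by omega
          rw [e]
          show pyGcd (F arr i (j - i - 1)) (arr.getD j 0) = F arr i (j - i - 1 + 1)
          have e2 : i + (j - i - 1) + 1 = j := by omega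
          rw [show F arr i (j - i - 1 + 1)
              = pyGcd (F arr i (j - i - 1)) (arr.getD (i + (j - i - 1) + 1) 0) from rfl, e2]
      rw [hval]
      show F arr i (j - i) :: gcdRow arr i n (F arr i (j - i)) (j + 1)
          = F arr i (j - i) :: gseq arr n i (j + 1)
      rw [ihf (j + 1) _ (by omega) (by omega) ?_]
      intro _
      congr 1
      omega
    · rw [gcdRow, if_neg hlt, gseq, if_neg hlt]

def pySeqCount (x : Int) : List Int → Int
  | [] => 0
  | c :: rest => (if c = x then 1 else 0) + (if c < x then 0 else pySeqCount x rest)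

theorem scanRow_stepRun (x g : Int) (row : List (Int × Int)) :
    scanRow x (stepRun g row) = (if g = x then 1 else 0) + (if g < x then 0 else scanRow x row) := by
  match row with
  | [] =>
    show scanRow x [(g, 1)] = _
    rw [scanRow]
    split_ifs <;> simp [scanRow] <;> omega
  | (g0, c0) :: rest =>
    rw [stepRun]
    by_cases he : g0 = g
    · rw [if_pos he]
      subst he
      rw [scanRow, scanRow]
      split_ifs <;> omega
    · rw [if_neg he]
      rw [scanRow]
      split_ifs <;> omega

theorem scanRow_compress (x : Int) (gs : List Int) :
    scanRow x (compress gs) = pySeqCount x gs := by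
  induction gs with
  | nil => rfl
  | cons g gs ih =>
    show scanRow x (stepRun g (compress gs)) = _
    rw [scanRow_stepRun, ih, pySeqCount]

theorem pySeqCount_gseq (arr : List Int) (n : Nat) (x : Int) (i : Nat) :
    ∀ j, pySeqCount x (gseq arr n i j) = seqCnt arr n x i j := by
  intro j
  induction j using gseq.induct n with
  | case1 j hlt ih =>
    rw [gseq, if_pos hlt, pySeqCount, ih]
    conv_rhs => rw [seqCnt, if_pos hlt]
  | case2 j hlt =>
    rw [gseq, if_neg hlt, seqCnt, if_neg hlt]
    rfl

theorem buildRuns_fold (arr : List Int) (n : Nat) (x : Int) :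
    ∀ i t, (buildRuns arr n i).foldl (fun t row => t + scanRow x row) t = t + totCnt arr n x i := by
  intro i
  induction i using buildRuns.induct n with
  | case1 i hlt ih =>
    intro t
    rw [buildRuns, if_pos hlt, List.foldl_cons, ih]
    rw [gcdRow_eq arr n i i 0 (le_refl i) (fun h => absurd h (lt_irrefl i)),
        scanRow_compress, pySeqCount_gseq]
    conv_rhs => rw [totCnt, if_pos hlt]
    ring
  | case2 i hlt =>
    intro t
    rw [buildRuns, if_neg hlt, totCnt, if_neg hlt]
    simp


-- ===== VERDICT (by name: the statement is the Claim_ definition above) =====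
theorem solve_spec : Claim_equal_solve := by
  unfold Claim_equal_solve
  intro arr queries _
  show solve arr queries = solve_alt arr queries
  rw [solve, solve_alt]
  rw [PySem.List.foldl_append_singleton_eq_map, PySem.List.foldl_append_singleton_eq_map]
  apply List.map_congr_left
  intro x _
  rw [solveOuter_spec arr x 0 PySem.Dict.empty]
  rw [buildRuns_fold arr arr.length x 0 0]
  simp [PySem.Dict.getD, PySem.Dict.empty, PySem.Dict.get?]
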